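-- pv_equiv track=rewrite | github.com/zhongxingyu/Solidity-Event-Study | Event-Checker/gas_reducer/FunctionDefinition.py | checkVariable
-- ===== SOURCE A (Python) =====
-- def checkVariable(binary_operation_list,variable,temp_typename_list,emit_variable_list):
--     flag = False
--     for item in binary_operation_list:
--         if item[0] == variable:
--             if item[1] in temp_typename_list and item[1] not in emit_variable_list:
--                 flag = True
--                 break
--         elif item[1] == variable:
--             if item[0] in temp_typename_list and item[0] not in emit_variable_list:
--                 flag = True
--                 break
--
--     return flag
-- ===== SOURCE B (Python) =====
-- def checkVariable(binary_operation_list, variable, temp_typename_list, emit_variable_list):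
--     partners = set()
--     for a, b in binary_operation_list:
--         if a == variable:
--             partners.add(b)
--         elif b == variable:
--             partners.add(a)
--     valid = set(temp_typename_list) - set(emit_variable_list)
--     return bool(partners & valid)
-- ===== Notes on version B (the rewrite author's own statement) =====
-- stated objective: alternative
-- what changed: Replaces the per-item membership tests with early break by a collect-then-intersect strategy: one pass gathers all partner names into a set, then the answer is whether that set intersects set(temp_typename_list) - set(emit_variable_list).
import Mathlib
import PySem

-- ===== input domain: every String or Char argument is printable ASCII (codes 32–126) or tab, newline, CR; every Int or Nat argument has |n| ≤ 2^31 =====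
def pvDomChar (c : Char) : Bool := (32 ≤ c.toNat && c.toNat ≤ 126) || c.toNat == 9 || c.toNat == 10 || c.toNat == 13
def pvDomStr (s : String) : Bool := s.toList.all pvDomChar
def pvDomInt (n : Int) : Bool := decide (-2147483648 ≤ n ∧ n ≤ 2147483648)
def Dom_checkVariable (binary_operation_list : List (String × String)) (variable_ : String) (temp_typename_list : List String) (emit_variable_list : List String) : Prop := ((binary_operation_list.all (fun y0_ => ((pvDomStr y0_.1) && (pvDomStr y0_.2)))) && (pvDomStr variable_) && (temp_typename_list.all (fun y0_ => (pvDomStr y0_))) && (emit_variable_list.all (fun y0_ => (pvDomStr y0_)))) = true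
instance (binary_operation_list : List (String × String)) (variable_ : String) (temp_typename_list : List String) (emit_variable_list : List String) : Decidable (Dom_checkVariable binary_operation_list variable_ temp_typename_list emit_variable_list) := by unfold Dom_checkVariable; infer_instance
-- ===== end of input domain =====

-- B replaces A's per-item membership tests (with early break) by a collect-then-intersect
-- strategy: gather all partner names into a set, then intersect with set(temp) - set(emit).

-- ===== PORT A =====
def checkVariable (binary_operation_list : List (String × String)) (variable_ : String) (temp_typename_list : List String) (emit_variable_list : List String) : Bool :=
  match binary_operation_list with
  | [] => false
  | item :: rest =>
    if item.1 = variable_ then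
      if item.2 ∈ temp_typename_list ∧ item.2 ∉ emit_variable_list then true
      else checkVariable rest variable_ temp_typename_list emit_variable_list
    else if item.2 = variable_ then
      if item.1 ∈ temp_typename_list ∧ item.1 ∉ emit_variable_list then true
      else checkVariable rest variable_ temp_typename_list emit_variable_list
    else checkVariable rest variable_ temp_typename_list emit_variable_list

-- ===== PORT B =====
def checkVariable_alt (binary_operation_list : List (String × String)) (variable_ : String) (temp_typename_list : List String) (emit_variable_list : List String) : Bool :=
  let partners : PySem.Set String :=
    binary_operation_list.foldl
      (fun s item =>
        if item.1 = variable_ then PySem.Set.add s item.2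
        else if item.2 = variable_ then PySem.Set.add s item.1
        else s)
      PySem.Set.empty
  let valid : PySem.Set String :=
    PySem.Set.diff (PySem.Set.ofList temp_typename_list) emit_variable_list
  !(PySem.Set.inter partners valid).isEmpty

-- ===== PRECONDITION & SPEC =====
def Spec_checkVariable (binary_operation_list : List (String × String)) (variable_ : String) (temp_typename_list : List String) (emit_variable_list : List String) (out : Bool) : Prop := out = checkVariable_alt binary_operation_list variable_ temp_typename_list emit_variable_list
instance (binary_operation_list : List (String × String)) (variable_ : String) (temp_typename_list : List String) (emit_variable_list : List String) (out : Bool) : Decidable (Spec_checkVariable binary_operation_list variable_ temp_typename_list emit_variable_list out) := by unfold Spec_checkVariable; infer_instance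

-- ===== CLAIM (what is proved, stated in full; the proofs are below) =====
def Claim_equal_checkVariable : Prop := ∀ (binary_operation_list : List (String × String)) (variable_ : String) (temp_typename_list : List String) (emit_variable_list : List String), Dom_checkVariable binary_operation_list variable_ temp_typename_list emit_variable_list → Spec_checkVariable binary_operation_list variable_ temp_typename_list emit_variable_list (checkVariable binary_operation_list variable_ temp_typename_list emit_variable_list)

-- ===== LEMMAS AND PROOFS =====

-- characterisation of A's result
theorem checkVariable_true_iff (l : List (String × String)) (v : String) (t e : List String) :
    checkVariable l v t e = true ↔
      ∃ p ∈ l, (p.1 = v ∧ p.2 ∈ t ∧ p.2 ∉ e) ∨ (p.1 ≠ v ∧ p.2 = v ∧ p.1 ∈ t ∧ p.1 ∉ e) := by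
  induction l with
  | nil => simp [checkVariable]
  | cons hd tl ih =>
    simp only [checkVariable]
    by_cases h1 : hd.1 = v
    · by_cases h2 : hd.2 ∈ t ∧ hd.2 ∉ e
      · simp only [if_pos h1, if_pos h2, true_iff]
        exact ⟨hd, List.mem_cons_self, Or.inl ⟨h1, h2.1, h2.2⟩⟩
      · simp only [if_pos h1, if_neg h2, ih]
        constructor
        · rintro ⟨p, hp, h⟩; exact ⟨p, List.mem_cons_of_mem _ hp, h⟩
        · rintro ⟨p, hp, h⟩
          rcases List.mem_cons.mp hp with rfl | hp'
          · rcases h with ⟨_, hm, hn⟩ | ⟨hne, _, _⟩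
            · exact absurd ⟨hm, hn⟩ h2
            · exact absurd h1 hne
          · exact ⟨p, hp', h⟩
    · by_cases h3 : hd.2 = v
      · by_cases h4 : hd.1 ∈ t ∧ hd.1 ∉ e
        · simp only [if_neg h1, if_pos h3, if_pos h4, true_iff]
          exact ⟨hd, List.mem_cons_self, Or.inr ⟨h1, h3, h4.1, h4.2⟩⟩
        · simp only [if_neg h1, if_pos h3, if_neg h4, ih]
          constructor
          · rintro ⟨p, hp, h⟩; exact ⟨p, List.mem_cons_of_mem _ hp, h⟩
          · rintro ⟨p, hp, h⟩
            rcases List.mem_cons.mp hp with rfl | hp'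
            · rcases h with ⟨heq, _, _⟩ | ⟨_, _, hm, hn⟩
              · exact absurd heq h1
              · exact absurd ⟨hm, hn⟩ h4
            · exact ⟨p, hp', h⟩
      · simp only [if_neg h1, if_neg h3, ih]
        constructor
        · rintro ⟨p, hp, h⟩; exact ⟨p, List.mem_cons_of_mem _ hp, h⟩
        · rintro ⟨p, hp, h⟩
          rcases List.mem_cons.mp hp with rfl | hp'
          · rcases h with ⟨heq, _⟩ | ⟨_, heq, _⟩
            · exact absurd heq h1
            · exact absurd heq h3
          · exact ⟨p, hp', h⟩

-- membership in B's partners fold, for an arbitrary accumulator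
theorem mem_partners_fold (l : List (String × String)) (v : String) (s : PySem.Set String) (x : String) :
    x ∈ l.foldl
        (fun s item =>
          if item.1 = v then PySem.Set.add s item.2
          else if item.2 = v then PySem.Set.add s item.1
          else s) s ↔
      x ∈ s ∨ ∃ p ∈ l, (p.1 = v ∧ x = p.2) ∨ (p.1 ≠ v ∧ p.2 = v ∧ x = p.1) := by
  induction l generalizing s with
  | nil => simp
  | cons hd tl ih =>
    simp only [List.foldl_cons]
    split_ifs with h1 h2
    · simp [ih, PySem.Set.mem_add, h1]
      exact or_assoc
    · simp [ih, PySem.Set.mem_add, h1, h2]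
      exact or_assoc
    · simp [ih, h1, h2]

theorem checkVariable_spec' (l : List (String × String)) (v : String) (t e : List String) :
    checkVariable l v t e = checkVariable_alt l v t e := by
  have hb : checkVariable_alt l v t e = true ↔
      ∃ x, (x ∈ t ∧ x ∉ e) ∧
        ∃ p ∈ l, (p.1 = v ∧ x = p.2) ∨ (p.1 ≠ v ∧ p.2 = v ∧ x = p.1) := by
    simp only [checkVariable_alt, Bool.not_eq_true', List.isEmpty_eq_false_iff_exists_mem]
    constructor
    · rintro ⟨x, hx⟩
      rw [PySem.Set.mem_inter] at hx
      obtain ⟨hp, hvld⟩ := hx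
      rw [PySem.Set.mem_diff, PySem.Set.mem_ofList] at hvld
      rw [mem_partners_fold] at hp
      simp only [PySem.Set.empty, List.not_mem_nil, false_or] at hp
      exact ⟨x, hvld, hp⟩
    · rintro ⟨x, hvld, hp⟩
      refine ⟨x, ?_⟩
      rw [PySem.Set.mem_inter, PySem.Set.mem_diff, PySem.Set.mem_ofList,
        mem_partners_fold]
      simp only [PySem.Set.empty, List.not_mem_nil, false_or]
      exact ⟨hp, hvld⟩
  have ha := checkVariable_true_iff l v t e
  cases hA : checkVariable l v t e
  · cases hB : checkVariable_alt l v t e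
    · rfl
    · exfalso
      obtain ⟨x, hvld, p, hpl, hp⟩ := hb.mp hB
      have : checkVariable l v t e = true := by
        refine ha.mpr ⟨p, hpl, ?_⟩
        rcases hp with ⟨h1, h2⟩ | ⟨h1, h2, h3⟩
        · exact Or.inl ⟨h1, h2 ▸ hvld.1, h2 ▸ hvld.2⟩
        · exact Or.inr ⟨h1, h2, h3 ▸ hvld.1, h3 ▸ hvld.2⟩
      simp [hA] at this
  · obtain ⟨p, hpl, hp⟩ := ha.mp hA
    refine (hb.mpr ?_).symm
    rcases hp with ⟨h1, h2, h3⟩ | ⟨h1, h2, h3, h4⟩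
    · exact ⟨p.2, ⟨h2, h3⟩, p, hpl, Or.inl ⟨h1, rfl⟩⟩
    · exact ⟨p.1, ⟨h3, h4⟩, p, hpl, Or.inr ⟨h1, h2, rfl⟩⟩

-- ===== VERDICT (by name: the statement is the Claim_ definition above) =====
theorem checkVariable_spec : Claim_equal_checkVariable := by
  intro l v t e _
  exact checkVariable_spec' l v t e
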